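-- pv_equiv track=rewrite | github.com/tanmoysrt/BCSE3-Assignment | Computer Network/Ass1/codes/helper.py | polynomialStringParser
-- ===== SOURCE A (Python) =====
-- from functools import cmp_to_key
--
-- def polynomialStringParser(input:str):
--     # Raise exception for invalid input
--     if input == '' :
--         raise Exception("Invalid input")
--     if input.find('x') != -1 and input.find('x^') == -1:
--         raise Exception("Invalid input")
--
--     # Main logic
--     data = []
--
--     # Iterate over list of (Splitted at the '+').removeSpaces
--     for d in [j.strip() for j in input.split('+')]:
--         if len(d) == 1:
--             data.append((0, int(d)))
--         else:
--             tmp = d.split('x^')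
--             if len(tmp) == 1:
--                 data.append((int(tmp[0]), 1))
--             elif len(tmp) == 2:
--                 if tmp[0] == '':
--                     data.append((int(tmp[1]), 1))
--                 else:
--                     data.append((int(tmp[1]), int(tmp[0])))
--
--     # Sort the list by degree
--     data = sorted(data, key=cmp_to_key(lambda item1, item2: item2[0] - item1[0]))
--
--     # Fill blank degress with 0 coefficients
--     final_data = []
--
--     i=0
--     while i < len(data)-1:
--         final_data.append(data[i])
--         a = data[i][0]
--         b = data[i+1][0]
--
--         if a-b > 1:
--             for j in range(b+1, a)[::-1]:
--                 final_data.append((j, 0))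
--         i+=1
--     final_data.append(data[i])
--     return final_data
-- ===== SOURCE B (Python) =====
-- def _parse_term(d):
--     if len(d) == 1:
--         return [(0, int(d))]
--     tmp = d.split('x^')
--     if len(tmp) == 1:
--         return [(int(tmp[0]), 1)]
--     if len(tmp) == 2:
--         if tmp[0] == '':
--             return [(int(tmp[1]), 1)]
--         return [(int(tmp[1]), int(tmp[0]))]
--     return []
--
--
-- def polynomialStringParser(input: str):
--     if input == '':
--         raise Exception("Invalid input")
--     if input.find('x') != -1 and input.find('x^') == -1:
--         raise Exception("Invalid input")
--
--     data = [p for t in input.split('+') for p in _parse_term(t.strip())]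
--
--     # bucket the coefficients by degree (insertion order preserves duplicates)
--     buckets = {}
--     for deg, c in data:
--         buckets[deg] = buckets.get(deg, []) + [c]
--
--     hi = max(buckets)
--     lo = min(buckets)
--
--     out = []
--     for d in range(hi, lo - 1, -1):
--         if d in buckets:
--             out += [(d, c) for c in buckets[d]]
--         else:
--             out += [(d, 0)]
--     return out
-- ===== Notes on version B (the rewrite author's own statement) =====
-- stated objective: alternative
-- what changed: B keeps A's term-parsing but replaces the comparator sort plus adjacent-pair gap-filling walk by a degree-to-coefficients bucket dict and a single descending range scan from the max to the min degree.
import Mathlib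
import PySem

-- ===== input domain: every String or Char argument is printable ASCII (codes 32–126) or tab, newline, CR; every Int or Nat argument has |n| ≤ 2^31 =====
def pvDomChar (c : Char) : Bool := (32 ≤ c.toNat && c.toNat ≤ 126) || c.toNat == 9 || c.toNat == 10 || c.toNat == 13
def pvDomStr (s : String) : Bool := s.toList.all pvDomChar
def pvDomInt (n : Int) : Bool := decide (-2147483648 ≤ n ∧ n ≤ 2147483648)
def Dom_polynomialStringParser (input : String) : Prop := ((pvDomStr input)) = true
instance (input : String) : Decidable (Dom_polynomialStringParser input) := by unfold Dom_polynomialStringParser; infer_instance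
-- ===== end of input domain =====

-- B replaces A's comparator sort plus adjacent-pair gap filling by a degree→coefficients bucket dict and one
-- descending range scan from max to min degree (objective: alternative; same parse loop, different assembly).

-- ===== PORT A =====
-- the final 'final_data.append(data[i])' on empty data raises IndexError (excluded by Pre_): here [] is returned
def pvFillA : List (Int × Int) → List (Int × Int)
  | [] => []
  | [p] => [p]
  | p :: q :: rest =>
      (p :: (if p.1 - q.1 > 1 then (PySem.List.pyRange (q.1 + 1) p.1 1).reverse.map (fun j => (j, (0 : Int))) else []))
        ++ pvFillA (q :: rest)
      -- range(b+1, a)[::-1] is exactly (pyRange (b+1) a 1).reverse (PySem.List.slice?_none_none_neg_one)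

def polynomialStringParser (input : String) : List (Int × Int) :=
  -- the two 'raise Exception("Invalid input")' guards and every int() ValueError lie outside Pre_;
  -- there the port returns junk ([] / getD 0)
  if input = "" then []
  else if PySem.Str.find input "x" ≠ -1 ∧ PySem.Str.find input "x^" = -1 then []
  else
    let data := (((PySem.Str.split? input "+").getD []).map PySem.Str.strip).foldl (fun acc d =>
      if PySem.Str.len d = 1 then
        acc ++ [((0 : Int), (PySem.Int.ofStr? d).getD 0)]
      else
        let tmp := (PySem.Str.split? d "x^").getD []
        if tmp.length = 1 then
          acc ++ [((PySem.Int.ofStr? (tmp.getD 0 "")).getD 0, (1 : Int))]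
        else if tmp.length = 2 then
          if tmp.getD 0 "" = "" then
            acc ++ [((PySem.Int.ofStr? (tmp.getD 1 "")).getD 0, (1 : Int))]
          else
            acc ++ [((PySem.Int.ofStr? (tmp.getD 1 "")).getD 0, (PySem.Int.ofStr? (tmp.getD 0 "")).getD 0)]
        else acc) []
    -- cmp_to_key with comparator item2[0] - item1[0] on Int degrees is exactly the stable descending sort by degree
    pvFillA (PySem.List.sorted data (fun p => p.1) true)

-- ===== PORT B =====
def pvChunks (input : String) : List String :=
  ((PySem.Str.split? input "+").getD []).map PySem.Str.strip   -- sep "+" ≠ "", so split? is always some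

def pvParseTerm (d : String) : List (Int × Int) :=
  if PySem.Str.len d = 1 then [((0 : Int), (PySem.Int.ofStr? d).getD 0)]
  else
    let tmp := (PySem.Str.split? d "x^").getD []
    if tmp.length = 1 then [((PySem.Int.ofStr? (tmp.getD 0 "")).getD 0, (1 : Int))]
    else if tmp.length = 2 then
      if tmp.getD 0 "" = "" then [((PySem.Int.ofStr? (tmp.getD 1 "")).getD 0, (1 : Int))]
      else [((PySem.Int.ofStr? (tmp.getD 1 "")).getD 0, (PySem.Int.ofStr? (tmp.getD 0 "")).getD 0)]
    else []

def polynomialStringParser_alt (input : String) : List (Int × Int) :=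
  if input = "" then []
  else if PySem.Str.find input "x" ≠ -1 ∧ PySem.Str.find input "x^" = -1 then []
  else
    let data := (pvChunks input).flatMap pvParseTerm
    -- buckets[deg] = buckets.get(deg, []) + [c]
    let buckets := data.foldl (fun d p => d.modify p.1 [] (fun l => l ++ [p.2])) PySem.Dict.empty
    match PySem.List.max? buckets.keys (fun k => k), PySem.List.min? buckets.keys (fun k => k) with
    | some hi, some lo =>
        (PySem.List.pyRange hi (lo - 1) (-1)).foldl (fun out d =>
          if buckets.contains d then out ++ (buckets.getD d []).map (fun c => (d, c))
          else out ++ [(d, (0 : Int))]) []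
    | _, _ => []   -- max() on the empty dict raises ValueError (excluded by Pre_)

-- ===== PRECONDITION & SPEC =====
-- chunk shapes on which A's int() conversions succeed (no ValueError)
def pvValidChunk (d : String) : Bool :=
  if PySem.Str.len d = 1 then (PySem.Int.ofStr? d).isSome
  else
    match (PySem.Str.split? d "x^").getD [] with
    | [t0] => (PySem.Int.ofStr? t0).isSome
    | [t0, t1] => (PySem.Int.ofStr? t1).isSome && (t0 == "" || (PySem.Int.ofStr? t0).isSome)
    | _ => true

-- chunk shapes that contribute an entry to A's data list (a 3+-part 'x^' split is silently skipped)
def pvProduces (d : String) : Bool :=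
  PySem.Str.len d == 1 || ((PySem.Str.split? d "x^").getD []).length == 1
    || ((PySem.Str.split? d "x^").getD []).length == 2

-- Pre_ is exactly where Python A returns: input nonempty, no 'x'-without-'x^' (both raise Exception),
-- every '+'-chunk parses without ValueError, and at least one chunk yields data (else data[0] raises IndexError)
def Pre_polynomialStringParser (input : String) : Prop :=
  input ≠ "" ∧
  (PySem.Str.find input "x" ≠ -1 → PySem.Str.find input "x^" ≠ -1) ∧
  (∀ d ∈ pvChunks input, pvValidChunk d = true) ∧
  (∃ d ∈ pvChunks input, pvProduces d = true)

instance (input : String) : Decidable (Pre_polynomialStringParser input) := by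
  unfold Pre_polynomialStringParser; infer_instance

def pvWitness_polynomialStringParser : String := "3x^2+1"

def Spec_polynomialStringParser (input : String) (out : List (Int × Int)) : Prop := out = polynomialStringParser_alt input
instance (input : String) (out : List (Int × Int)) : Decidable (Spec_polynomialStringParser input out) := by unfold Spec_polynomialStringParser; infer_instance

-- ===== CLAIM (what is proved, stated in full; the proofs are below) =====
def Claim_equal_polynomialStringParser : Prop := ∀ (input : String), Dom_polynomialStringParser input → Pre_polynomialStringParser input → Spec_polynomialStringParser input (polynomialStringParser input)

-- ===== LEMMAS AND PROOFS =====

-- what one scanned degree emits, phrased over a plain pair list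
def pvEmit (s : List (Int × Int)) (d : Int) : List (Int × Int) :=
  if d ∈ s.map Prod.fst then (s.filter (fun p => p.1 == d)).map (fun p => (d, p.2)) else [(d, (0 : Int))]

theorem pv_parse_body (acc : List (Int × Int)) (d : String) :
    (if PySem.Str.len d = 1 then
        acc ++ [((0 : Int), (PySem.Int.ofStr? d).getD 0)]
      else
        let tmp := (PySem.Str.split? d "x^").getD []
        if tmp.length = 1 then
          acc ++ [((PySem.Int.ofStr? (tmp.getD 0 "")).getD 0, (1 : Int))]
        else if tmp.length = 2 then
          if tmp.getD 0 "" = "" then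
            acc ++ [((PySem.Int.ofStr? (tmp.getD 1 "")).getD 0, (1 : Int))]
          else
            acc ++ [((PySem.Int.ofStr? (tmp.getD 1 "")).getD 0, (PySem.Int.ofStr? (tmp.getD 0 "")).getD 0)]
        else acc) = acc ++ pvParseTerm d := by
  simp only [pvParseTerm]
  split_ifs <;> simp

theorem pv_produces_ne_nil {d : String} (h : pvProduces d = true) : pvParseTerm d ≠ [] := by
  simp only [pvProduces, Bool.or_eq_true, beq_iff_eq] at h
  simp only [pvParseTerm]
  split_ifs with h1 h2 h3 h4 <;> simp_all

theorem pv_insertBy_pairwise {α : Type} (key : α → Int) (x : α) (ys : List α)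
    (h : ys.Pairwise (fun a b => key b ≤ key a)) :
    (PySem.List.insertBy (fun a b => decide (key b < key a)) x ys).Pairwise (fun a b => key b ≤ key a) := by
  induction ys with
  | nil => simp [PySem.List.insertBy]
  | cons y ys ih =>
    rw [List.pairwise_cons] at h
    by_cases hb : key y < key x
    · rw [show PySem.List.insertBy (fun a b => decide (key b < key a)) x (y :: ys) = x :: y :: ys by
        simp [PySem.List.insertBy, hb]]
      refine List.Pairwise.cons ?_ (List.Pairwise.cons h.1 h.2)
      intro z hz
      rcases List.mem_cons.mp hz with rfl | hz
      · exact le_of_lt hb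
      · exact le_trans (h.1 z hz) (le_of_lt hb)
    · rw [show PySem.List.insertBy (fun a b => decide (key b < key a)) x (y :: ys)
          = y :: PySem.List.insertBy (fun a b => decide (key b < key a)) x ys by
        simp [PySem.List.insertBy, hb]]
      refine List.Pairwise.cons ?_ (ih h.2)
      intro z hz
      rw [PySem.List.mem_insertBy] at hz
      rcases hz with rfl | hz
      · exact le_of_not_gt hb
      · exact h.1 z hz

theorem pv_filter_insertBy {α : Type} (key : α → Int) (v : Int) (x : α) (ys : List α)
    (h : ys.Pairwise (fun a b => key b ≤ key a)) :
    (PySem.List.insertBy (fun a b => decide (key b < key a)) x ys).filter (fun p => key p == v)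
      = ys.filter (fun p => key p == v) ++ (if key x == v then [x] else []) := by
  induction ys with
  | nil =>
    cases h1 : (key x == v) <;> simp [PySem.List.insertBy, h1]
  | cons y ys ih =>
    rw [List.pairwise_cons] at h
    by_cases hb : key y < key x
    · rw [show PySem.List.insertBy (fun a b => decide (key b < key a)) x (y :: ys) = x :: y :: ys by
        simp [PySem.List.insertBy, hb]]
      by_cases hxv : key x = v
      · -- every element of y :: ys has key < key x = v, so none passes the filter
        have hnone : (y :: ys).filter (fun p => key p == v) = [] := by
          apply List.filter_eq_nil_iff.mpr
          intro z hz
          have hzy : key z ≤ key y := by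
            rcases List.mem_cons.mp hz with rfl | hz
            · exact le_refl _
            · exact h.1 z hz
          simp only [beq_iff_eq]
          omega
        simp [hnone, hxv]
      · have hxv' : (key x == v) = false := by simp [hxv]
        simp [List.filter_cons, hxv']
    · rw [show PySem.List.insertBy (fun a b => decide (key b < key a)) x (y :: ys)
          = y :: PySem.List.insertBy (fun a b => decide (key b < key a)) x ys by
        simp [PySem.List.insertBy, hb]]
      rw [List.filter_cons, List.filter_cons, ih h.2]
      by_cases hy : key y == v <;> simp [hy]

-- stability of Python's sort: filtering one degree class out of the sorted list gives the original subsequence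
theorem pv_sorted_filter_stable {α : Type} (xs : List α) (key : α → Int) (v : Int) :
    (PySem.List.sorted xs key true).filter (fun p => key p == v) = xs.filter (fun p => key p == v) := by
  rw [PySem.List.sorted_rev_eq_foldl_insertBy]
  suffices h : ∀ (acc : List α), acc.Pairwise (fun a b => key b ≤ key a) →
      (xs.foldl (fun acc x => PySem.List.insertBy (fun a b => decide (key b < key a)) x acc) acc).filter
          (fun p => key p == v)
        = acc.filter (fun p => key p == v) ++ xs.filter (fun p => key p == v) by
    simpa using h [] (by simp)
  induction xs with
  | nil => simp
  | cons x xs ih =>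
    intro acc hacc
    rw [List.foldl_cons, ih _ (pv_insertBy_pairwise key x acc hacc), pv_filter_insertBy key v x acc hacc,
      List.filter_cons]
    by_cases hx : key x == v <;> simp [hx]

-- descending range splits at any midpoint
theorem pv_pyRange_neg_one_append (a b c : Int) (h1 : b ≤ a) (h2 : c ≤ b) :
    PySem.List.pyRange a c (-1) = PySem.List.pyRange a b (-1) ++ PySem.List.pyRange b c (-1) := by
  rw [PySem.List.pyRange_neg_one_eq_reverse, PySem.List.pyRange_neg_one_eq_reverse,
    PySem.List.pyRange_neg_one_eq_reverse,
    PySem.List.pyRange_one_append (c + 1) (b + 1) (a + 1) (by omega) (by omega), List.reverse_append]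

theorem pv_flatMap_congr {α β : Type} {l : List α} {f g : α → List β}
    (h : ∀ x ∈ l, f x = g x) : l.flatMap f = l.flatMap g := by
  induction l with
  | nil => rfl
  | cons x l ih => simp only [List.flatMap_cons, h x (by simp), ih fun y hy => h y (by simp [hy])]

-- the core: scanning every degree from the max down to the min of a descending-sorted list,
-- emitting its degree class or a zero filler, is exactly A's adjacent-pair gap filling
theorem pv_fill_eq (s : List (Int × Int)) (h : s ≠ []) (hp : s.Pairwise (fun a b => b.1 ≤ a.1))
    (hi lo : Int) (hhi_mem : hi ∈ s.map Prod.fst) (hhi_ub : ∀ y ∈ s, y.1 ≤ hi)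
    (hlo_mem : lo ∈ s.map Prod.fst) (hlo_lb : ∀ y ∈ s, lo ≤ y.1) :
    (PySem.List.pyRange hi (lo - 1) (-1)).flatMap (pvEmit s) = pvFillA s := by
  induction s generalizing hi lo with
  | nil => simp at h
  | cons p t ih =>
    have hall : ∀ z ∈ p :: t, z.1 ≤ p.1 := by
      intro z hz
      rcases List.mem_cons.mp hz with rfl | hz
      · exact le_refl _
      · exact (List.pairwise_cons.mp hp).1 z hz
    have hhieq : hi = p.1 := by
      obtain ⟨z, hz, rfl⟩ := List.mem_map.mp hhi_mem
      have h1 := hall z hz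
      have h2 := hhi_ub p (by simp)
      omega
    rcases eq_or_ne t [] with rfl | ht
    · -- single element: hi = lo = p.1, the scan emits exactly [p]
      have hloeq : lo = p.1 := by
        obtain ⟨z, hz, rfl⟩ := List.mem_map.mp hlo_mem
        simp at hz
        simp [hz]
      rw [hhieq, hloeq,
        show PySem.List.pyRange p.1 (p.1 - 1) (-1) = [p.1] by
          rw [PySem.List.pyRange_neg_one_cons (by omega), PySem.List.pyRange_neg_one_eq_nil (by omega)]]
      simp [pvEmit, pvFillA]
    · obtain ⟨q, rest, rfl⟩ := List.exists_cons_of_ne_nil ht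
      rw [List.pairwise_cons] at hp
      have hq : q.1 ≤ p.1 := hp.1 q (by simp)
      have hrest : ∀ z ∈ q :: rest, z.1 ≤ q.1 := by
        intro z hz
        rcases List.mem_cons.mp hz with rfl | hz
        · exact le_refl _
        · exact (List.pairwise_cons.mp hp.2).1 z hz
      have hloq : lo ≤ q.1 := hlo_lb q (by simp)
      have hlo_mem' : lo ∈ (q :: rest).map Prod.fst := by
        obtain ⟨z, hz, rfl⟩ := List.mem_map.mp hlo_mem
        rcases List.mem_cons.mp hz with rfl | hz
        · -- the min degree is p's own: then p.1 = q.1 and q witnesses it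
          have : z.1 = q.1 := by omega
          exact List.mem_map.mpr ⟨q, by simp, this.symm⟩
        · exact List.mem_map.mpr ⟨z, hz, rfl⟩
      -- the tail scan agrees chunk by chunk below p.1 (p only matters at degree p.1)
      have hemit_lt : ∀ d : Int, d < p.1 → pvEmit (p :: q :: rest) d = pvEmit (q :: rest) d := by
        clear ih
        intro d hd
        have hne : ¬ p.1 = d := by omega
        have hne' : ¬ d = p.1 := by omega
        simp only [pvEmit, List.map_cons, List.mem_cons, List.filter_cons]
        split_ifs <;> simp_all
      have hIH := ih ht hp.2 q.1 lo (by simp) hrest hlo_mem'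
        (fun y hy => hlo_lb y (List.mem_cons_of_mem p hy))
      rw [hhieq,
        pv_pyRange_neg_one_append p.1 q.1 (lo - 1) hq (by omega),
        List.flatMap_append]
      by_cases hcase : q.1 = p.1
      · -- equal head degrees: no gap, p's entry merges into the q-degree class
        rw [show PySem.List.pyRange p.1 q.1 (-1) = [] from PySem.List.pyRange_neg_one_eq_nil (by omega)]
        have hq1 : pvEmit (p :: q :: rest) q.1 = p :: pvEmit (q :: rest) q.1 := by
          simp only [pvEmit, List.map_cons, List.mem_cons, List.filter_cons]
          simp [hcase]
        rw [show PySem.List.pyRange q.1 (lo - 1) (-1)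
            = q.1 :: PySem.List.pyRange (q.1 - 1) (lo - 1) (-1) from
          PySem.List.pyRange_neg_one_cons (by omega)]
        rw [List.flatMap_nil, List.nil_append, List.flatMap_cons, hq1,
          pv_flatMap_congr (f := pvEmit (p :: q :: rest)) (g := pvEmit (q :: rest)) (fun d hd => by
            rw [PySem.List.mem_pyRange_neg_one] at hd
            exact hemit_lt d (by omega)),
          List.cons_append, ← List.flatMap_cons,
          ← PySem.List.pyRange_neg_one_cons (show lo - 1 < q.1 by omega),
          hIH]
        simp [pvFillA, show ¬ (p.1 - q.1 > 1) by omega]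
      · have hqlt : q.1 < p.1 := lt_of_le_of_ne hq hcase
        -- head segment: p itself, then the zero fillers for the gap
        have hseg1 : (PySem.List.pyRange p.1 q.1 (-1)).flatMap (pvEmit (p :: q :: rest))
            = p :: (PySem.List.pyRange (p.1 - 1) q.1 (-1)).map (fun j => (j, (0 : Int))) := by
          rw [PySem.List.pyRange_neg_one_cons hqlt, List.flatMap_cons]
          have hp1 : pvEmit (p :: q :: rest) p.1 = [p] := by
            have hrestnil : rest.filter (fun z => z.1 == p.1) = [] := by
              apply List.filter_eq_nil_iff.mpr
              intro z hz
              have := hrest z (by simp [hz])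
              simp only [beq_iff_eq]; omega
            simp [pvEmit, hcase, hrestnil]
          rw [hp1,
            pv_flatMap_congr (g := fun d => [(d, (0 : Int))]) (fun d hd => by
              rw [PySem.List.mem_pyRange_neg_one] at hd
              have hnot : d ∉ (p :: q :: rest).map Prod.fst := by
                simp only [List.map_cons, List.mem_cons]
                rintro (rfl | rfl | hmem)
                · omega
                · omega
                · rw [List.mem_map] at hmem
                  obtain ⟨z, hz, rfl⟩ := hmem
                  have := hrest z (by simp [hz])
                  omega
              simp only [pvEmit]
              rw [if_neg hnot])]
          rw [← List.map_eq_flatMap]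
          simp
        have hseg2 : List.flatMap (pvEmit (p :: q :: rest)) (PySem.List.pyRange q.1 (lo - 1) (-1))
            = List.flatMap (pvEmit (q :: rest)) (PySem.List.pyRange q.1 (lo - 1) (-1)) := by
          apply pv_flatMap_congr
          intro d hd
          rw [PySem.List.mem_pyRange_neg_one] at hd
          exact hemit_lt d (by omega)
        rw [hseg1, hseg2, hIH]
        simp only [pvFillA]
        by_cases hgap : p.1 - q.1 > 1
        · rw [PySem.List.pyRange_neg_one_eq_reverse]
          simp [hgap, List.map_reverse]
        · rw [show PySem.List.pyRange (p.1 - 1) q.1 (-1) = [] from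
            PySem.List.pyRange_neg_one_eq_nil (by omega)]
          simp [hgap]

-- ===== VERDICT (by name: the statement is the Claim_ definition above) =====
theorem polynomialStringParser_spec : Claim_equal_polynomialStringParser := by
  intro input _hdom hpre
  obtain ⟨hne, hx, _hvalid, hprod⟩ := hpre
  unfold Spec_polynomialStringParser polynomialStringParser polynomialStringParser_alt
  rw [if_neg hne, if_neg (by tauto), if_neg hne, if_neg (by tauto)]
  simp only []
  -- A's parse loop builds the same data list as B's flatMap of pvParseTerm
  have hfold : ∀ (chunks : List String), chunks.foldl (fun acc d =>
      if PySem.Str.len d = 1 then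
        acc ++ [((0 : Int), (PySem.Int.ofStr? d).getD 0)]
      else
        let tmp := (PySem.Str.split? d "x^").getD []
        if tmp.length = 1 then
          acc ++ [((PySem.Int.ofStr? (tmp.getD 0 "")).getD 0, (1 : Int))]
        else if tmp.length = 2 then
          if tmp.getD 0 "" = "" then
            acc ++ [((PySem.Int.ofStr? (tmp.getD 1 "")).getD 0, (1 : Int))]
          else
            acc ++ [((PySem.Int.ofStr? (tmp.getD 1 "")).getD 0, (PySem.Int.ofStr? (tmp.getD 0 "")).getD 0)]
        else acc) [] = chunks.flatMap pvParseTerm := by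
    intro chunks
    rw [show (fun (acc : List (Int × Int)) (d : String) =>
        if PySem.Str.len d = 1 then
          acc ++ [((0 : Int), (PySem.Int.ofStr? d).getD 0)]
        else
          let tmp := (PySem.Str.split? d "x^").getD []
          if tmp.length = 1 then
            acc ++ [((PySem.Int.ofStr? (tmp.getD 0 "")).getD 0, (1 : Int))]
          else if tmp.length = 2 then
            if tmp.getD 0 "" = "" then
              acc ++ [((PySem.Int.ofStr? (tmp.getD 1 "")).getD 0, (1 : Int))]
            else
              acc ++ [((PySem.Int.ofStr? (tmp.getD 1 "")).getD 0, (PySem.Int.ofStr? (tmp.getD 0 "")).getD 0)]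
          else acc) = (fun acc d => acc ++ pvParseTerm d) from
      funext fun acc => funext fun d => pv_parse_body acc d]
    rw [PySem.List.foldl_append_eq_flatMap, List.nil_append]
  rw [show ((PySem.Str.split? input "+").getD []).map PySem.Str.strip = pvChunks input from rfl, hfold]
  set xs := (pvChunks input).flatMap pvParseTerm with hxsdef
  -- the data list is nonempty
  have hxs : xs ≠ [] := by
    obtain ⟨d, hd, hpd⟩ := hprod
    intro hnil
    rw [hxsdef, List.flatMap_eq_nil_iff] at hnil
    exact pv_produces_ne_nil hpd (hnil d hd)
  set s := PySem.List.sorted xs (fun p => p.1) true with hsdef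
  have hs_ne : s ≠ [] := by
    rw [hsdef, Ne, PySem.List.sorted_eq_nil_iff]
    exact hxs
  have hp : s.Pairwise (fun a b => b.1 ≤ a.1) := by
    rw [hsdef]
    simpa using PySem.List.sorted_pairwise_rev xs (fun p => p.1)
  have hmem_s : ∀ v : Int, v ∈ s.map Prod.fst ↔ v ∈ xs.map Prod.fst := by
    intro v
    constructor <;> intro hm <;> obtain ⟨z, hz, rfl⟩ := List.mem_map.mp hm
    · refine List.mem_map.mpr ⟨z, ?_, rfl⟩
      rw [hsdef, PySem.List.mem_sorted] at hz
      exact hz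
    · exact List.mem_map.mpr ⟨z, by rw [hsdef, PySem.List.mem_sorted]; exact hz, rfl⟩
  -- the bucket dict: keys and lookups
  have hkeys : (xs.foldl (fun d p => d.modify p.1 [] (fun l => l ++ [p.2])) PySem.Dict.empty).keys
      = PySem.Set.ofList (xs.map Prod.fst) := by
    rw [PySem.Dict.keys_foldl_modify_key xs Prod.fst [] (fun d p => fun l => l ++ [p.2]) PySem.Dict.empty]
    simp [PySem.Dict.keys_empty, PySem.Set.update_nil_left]
  have hmemkeys : ∀ v : Int,
      (v ∈ (xs.foldl (fun d p => d.modify p.1 [] (fun l => l ++ [p.2])) PySem.Dict.empty).keys)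
        ↔ v ∈ xs.map Prod.fst := by
    intro v; rw [hkeys, PySem.Set.mem_ofList]
  obtain ⟨p0, hp0⟩ := List.exists_mem_of_ne_nil xs hxs
  cases hmax : PySem.List.max? (xs.foldl (fun d p => d.modify p.1 [] (fun l => l ++ [p.2]))
      PySem.Dict.empty).keys (fun k => k) with
  | none =>
    rw [PySem.List.max?_eq_none_iff, hkeys] at hmax
    have : p0.1 ∈ PySem.Set.ofList (xs.map Prod.fst) := by
      rw [PySem.Set.mem_ofList]
      exact List.mem_map.mpr ⟨_, hp0, rfl⟩
    simp [hmax] at this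
  | some hi =>
    cases hmin : PySem.List.min? (xs.foldl (fun d p => d.modify p.1 [] (fun l => l ++ [p.2]))
        PySem.Dict.empty).keys (fun k => k) with
    | none =>
      rw [PySem.List.min?_eq_none_iff, hkeys] at hmin
      have : p0.1 ∈ PySem.Set.ofList (xs.map Prod.fst) := by
        rw [PySem.Set.mem_ofList]
        exact List.mem_map.mpr ⟨_, hp0, rfl⟩
      simp [hmin] at this
    | some lo =>
      have hhi_mem : hi ∈ s.map Prod.fst :=
        (hmem_s hi).mpr ((hmemkeys hi).mp (PySem.List.max?_mem hmax))
      have hhi_ub : ∀ y ∈ s, y.1 ≤ hi := by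
        intro y hy
        have hy' : y ∈ xs := by rw [hsdef, PySem.List.mem_sorted] at hy; exact hy
        have := PySem.List.max?_isMax hmax y.1 ((hmemkeys y.1).mpr (List.mem_map.mpr ⟨y, hy', rfl⟩))
        simpa using this
      have hlo_mem : lo ∈ s.map Prod.fst :=
        (hmem_s lo).mpr ((hmemkeys lo).mp (PySem.List.min?_mem hmin))
      have hlo_lb : ∀ y ∈ s, lo ≤ y.1 := by
        intro y hy
        have hy' : y ∈ xs := by rw [hsdef, PySem.List.mem_sorted] at hy; exact hy
        have := PySem.List.min?_isMin hmin y.1 ((hmemkeys y.1).mpr (List.mem_map.mpr ⟨y, hy', rfl⟩))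
        simpa using this
      -- the scan loop is a flatMap of pvEmit over the descending degree range
      have hbody : (fun (out : List (Int × Int)) (d : Int) =>
          if (xs.foldl (fun d p => d.modify p.1 [] (fun l => l ++ [p.2])) PySem.Dict.empty).contains d then
            out ++ ((xs.foldl (fun d p => d.modify p.1 [] (fun l => l ++ [p.2]))
              PySem.Dict.empty).getD d []).map (fun c => (d, c))
          else out ++ [(d, (0 : Int))])
          = (fun out d => out ++ pvEmit xs d) := by
        funext out d
        rw [PySem.Dict.contains_eq_decide_mem_keys]
        by_cases hd : d ∈ xs.map Prod.fst
        · rw [if_pos (by rw [decide_eq_true_iff]; exact (hmemkeys d).mpr hd)]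
          rw [PySem.Dict.getD_foldl_modify_append xs PySem.Dict.empty d]
          simp only [pvEmit, if_pos hd, PySem.Dict.getD_empty, List.nil_append, List.map_map]
          rfl
        · rw [if_neg (by rw [decide_eq_true_iff]; intro hc; exact hd ((hmemkeys d).mp hc))]
          simp [pvEmit, hd]
      rw [hbody]
      show pvFillA s = List.foldl (fun out d => out ++ pvEmit xs d) [] (PySem.List.pyRange hi (lo - 1) (-1))
      rw [PySem.List.foldl_append_eq_flatMap, List.nil_append]
      have hstab : List.flatMap (pvEmit xs) (PySem.List.pyRange hi (lo - 1) (-1))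
          = List.flatMap (pvEmit s) (PySem.List.pyRange hi (lo - 1) (-1)) := by
        apply pv_flatMap_congr
        intro d _
        simp only [pvEmit]
        have hfil : xs.filter (fun p => p.1 == d) = s.filter (fun p => p.1 == d) := by
          rw [hsdef]
          exact (pv_sorted_filter_stable xs (fun p => p.1) d).symm
        rw [hfil]
        by_cases hd : d ∈ xs.map Prod.fst
        · rw [if_pos hd, if_pos ((hmem_s d).mpr hd)]
        · rw [if_neg hd, if_neg (fun hc => hd ((hmem_s d).mp hc))]
      rw [hstab]
      exact (pv_fill_eq s hs_ne hp hi lo hhi_mem hhi_ub hlo_mem hlo_lb).symm
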